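-- pv_equiv track=rewrite | github.com/wulinlw/leetcode_cn | 程序员面试金典/面试题16.16.部分排序.py | subSort
-- ===== SOURCE A (Python) =====
-- from typing import List
--
-- def subSort(array: List[int]) -> List[int]:
--     n = len(array)
--     maxval, minval = -10000000, 10000000
--     l, r = -1, -1
--     for i in range(n):                  #从左往右找最大值，出现小的，那这里就需要排序
--         if array[i] < maxval:
--             r = i
--         else:
--             maxval = array[i]
--
--     for i in range(n-1, -1, -1):        #从右往左找最小值，出现大的，就要排序
--         if array[i] > minval:
--             l = i
--         else:
--             minval = array[i]
--     return [l, r]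
-- ===== SOURCE B (Python) =====
-- from typing import List
--
-- def subSort(array: List[int]) -> List[int]:
--     b = sorted(array)
--     diff = [i for i in range(len(array)) if array[i] != b[i]]
--     if diff:
--         return [diff[0], diff[-1]]
--     return [-1, -1]
-- ===== Notes on version B (the rewrite author's own statement) =====
-- stated objective: simpler
-- what changed: Replaces A's two extreme-tracking index sweeps (running prefix max left-to-right and running suffix min right-to-left with sentinel bounds) by sorting a copy of the array and taking the first and last index where the array disagrees with its sorted version.
-- outside the precondition, e.g. on subSort([-20000000]): A returns [-1, 0], B returns [-1, -1]
import Mathlib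
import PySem

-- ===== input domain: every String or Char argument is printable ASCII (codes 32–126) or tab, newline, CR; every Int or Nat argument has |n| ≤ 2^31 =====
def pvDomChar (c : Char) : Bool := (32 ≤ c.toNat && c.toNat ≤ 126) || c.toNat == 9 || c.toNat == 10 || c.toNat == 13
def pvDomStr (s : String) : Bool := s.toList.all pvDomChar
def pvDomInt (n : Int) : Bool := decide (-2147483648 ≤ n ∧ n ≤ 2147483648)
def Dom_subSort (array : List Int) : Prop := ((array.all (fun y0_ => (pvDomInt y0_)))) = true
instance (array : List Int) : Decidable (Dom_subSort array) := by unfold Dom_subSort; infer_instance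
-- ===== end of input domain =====

-- B replaces A's two sentinel-based extreme-tracking sweeps with sort-then-compare (simpler, not faster).


-- ===== PORT A =====
def subSort (array : List Int) : List Int :=
  let n : Int := array.length
  let s1 := (PySem.List.pyRange 0 n 1).foldl
    (fun (st : Int × Int) (i : Int) =>
      if PySem.List.pyGetD array i 0 < st.1 then (st.1, i)
      else (PySem.List.pyGetD array i 0, st.2))
    (-10000000, -1)
  let s2 := (PySem.List.pyRange (n - 1) (-1) (-1)).foldl
    (fun (st : Int × Int) (i : Int) =>
      if PySem.List.pyGetD array i 0 > st.1 then (st.1, i)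
      else (PySem.List.pyGetD array i 0, st.2))
    (10000000, -1)
  [s2.2, s1.2]

-- ===== PORT B =====
def subSort_alt (array : List Int) : List Int :=
  let b := PySem.List.sorted array (fun x => x) false
  let diff := (PySem.List.pyRange 0 (array.length : Int) 1).filter
    (fun i => decide (PySem.List.pyGetD array i 0 ≠ PySem.List.pyGetD b i 0))
  if diff = [] then [-1, -1]
  else [PySem.List.pyGetD diff 0 0, PySem.List.pyGetD diff (-1) 0]

-- ===== PRECONDITION & SPEC =====
-- Pre_ restricts elements to the natural (LeetCode) value range |x| ≤ 10^7 that A's sentinel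
-- initialisations (-10000000 / 10000000) assume; outside it A's sentinels can misclassify
-- in-order extreme elements as out of place, so A's value there is an artefact of the sentinels.
def Pre_subSort (array : List Int) : Prop := ∀ x ∈ array, -10000000 ≤ x ∧ x ≤ 10000000
instance (array : List Int) : Decidable (Pre_subSort array) := by unfold Pre_subSort; infer_instance
def pvWitness_subSort : List Int := [3, 1, 2]
def Spec_subSort (array : List Int) (out : List Int) : Prop := out = subSort_alt array
instance (array : List Int) (out : List Int) : Decidable (Spec_subSort array out) := by unfold Spec_subSort; infer_instance

-- ===== CLAIM (what is proved, stated in full; the proofs are below) =====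
def Claim_equal_subSort : Prop := ∀ (array : List Int), Dom_subSort array → Pre_subSort array → Spec_subSort array (subSort array)

-- ===== LEMMAS AND PROOFS =====

-- Pure-list view of A's first loop (left-to-right, running max, indices counting up from i).
def sweepR (st : Int × Int) (i : Int) : List Int → Int × Int
  | [] => st
  | x :: xs => if x < st.1 then sweepR (st.1, i) (i + 1) xs else sweepR (x, st.2) (i + 1) xs

-- Pure-list view of A's second loop (right-to-left, running min, indices counting down from i;
-- the list argument is the array reversed).
def sweepL (st : Int × Int) (i : Int) : List Int → Int × Int
  | [] => st
  | x :: xs => if x > st.1 then sweepL (st.1, i) (i - 1) xs else sweepL (x, st.2) (i - 1) xs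

theorem bridge1 (a : List Int) : ∀ (xs : List Int) (k : Int) (st : Int × Int), 0 ≤ k →
    xs = a.drop k.toNat →
    (PySem.List.pyRange k (a.length : Int) 1).foldl
      (fun (st : Int × Int) (i : Int) =>
        if PySem.List.pyGetD a i 0 < st.1 then (st.1, i)
        else (PySem.List.pyGetD a i 0, st.2)) st = sweepR st k xs := by
  intro xs
  induction xs with
  | nil =>
    intro k st hk hxs
    have hge : a.length ≤ k.toNat := List.drop_eq_nil_iff.mp hxs.symm
    rw [PySem.List.pyRange_one_eq_nil (by omega : (a.length : Int) ≤ k)]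
    rfl
  | cons x xs ih =>
    intro k st hk hxs
    have hlt : k.toNat < a.length := by
      by_contra hge
      rw [not_lt] at hge
      rw [List.drop_eq_nil_iff.mpr hge] at hxs
      simp at hxs
    rw [List.drop_eq_getElem_cons hlt, List.cons_eq_cons] at hxs
    obtain ⟨hx, hxs'⟩ := hxs
    rw [PySem.List.pyRange_one_cons (by omega : k < (a.length : Int))]
    simp only [List.foldl_cons]
    rw [PySem.List.pyGetD_eq_getElem a 0 hk (by omega), ← hx]
    have := ih (k + 1) (if x < st.1 then (st.1, k) else (x, st.2)) (by omega)
      (by rw [hxs']; congr 1; omega)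
    rw [this]
    by_cases hc : x < st.1 <;> simp [sweepR, hc]

theorem bridge2 (a : List Int) : ∀ (xs : List Int) (k : Int) (st : Int × Int),
    k + 1 = xs.length → xs = (a.take (k + 1).toNat).reverse →
    (PySem.List.pyRange k (-1) (-1)).foldl
      (fun (st : Int × Int) (i : Int) =>
        if PySem.List.pyGetD a i 0 > st.1 then (st.1, i)
        else (PySem.List.pyGetD a i 0, st.2)) st = sweepL st k xs := by
  intro xs
  induction xs with
  | nil =>
    intro k st hk hxs
    rw [PySem.List.pyRange_neg_one_eq_nil (by simp at hk; omega : k ≤ -1)]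
    rfl
  | cons x xs ih =>
    intro k st hk hxs
    have hk0 : 0 ≤ k := by simp only [List.length_cons] at hk; push_cast at hk; omega
    have htn : (k + 1).toNat = k.toNat + 1 := by omega
    have hlt : k.toNat < a.length := by
      by_contra hge
      rw [not_lt] at hge
      have : (a.take (k + 1).toNat).reverse.length = a.length := by
        simp only [List.length_reverse, List.length_take]; omega
      rw [← hxs] at this
      have hlen2 : (a.take (k + 1).toNat).reverse.length = xs.length + 1 := by
        rw [← hxs]; simp
      simp only [List.length_cons] at this
      simp only [List.length_cons] at hk
      push_cast at hk
      omega
    have hsplit : (a.take (k + 1).toNat).reverse = a[k.toNat] :: (a.take k.toNat).reverse := by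
      rw [htn, List.take_add_one, List.getElem?_eq_getElem hlt]
      simp
    rw [hsplit, List.cons_eq_cons] at hxs
    obtain ⟨hx, hxs'⟩ := hxs
    rw [PySem.List.pyRange_neg_one_cons (by omega : (-1:Int) < k)]
    simp only [List.foldl_cons]
    rw [PySem.List.pyGetD_eq_getElem a 0 hk0 (by omega), ← hx]
    have hlen' : (k - 1) + 1 = (xs.length : Int) := by
      have : xs.length = (a.take k.toNat).reverse.length := by rw [hxs']
      simp only [List.length_reverse, List.length_take] at this
      omega
    have := ih (k - 1) (if x > st.1 then (st.1, k) else (x, st.2)) hlen'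
      (by rw [hxs']; congr 2; omega)
    rw [this]
    by_cases hc : x > st.1 <;> simp [sweepL, hc]

theorem sweepR_bounds : ∀ (xs : List Int) (mv r0 i : Int),
    (sweepR (mv, r0) i xs).2 = r0 ∨
      (i ≤ (sweepR (mv, r0) i xs).2 ∧ (sweepR (mv, r0) i xs).2 < i + xs.length) := by
  intro xs
  induction xs with
  | nil => intro mv r0 i; left; rfl
  | cons x xs ih =>
    intro mv r0 i
    by_cases h : x < mv
    · have := ih mv i (i + 1)
      simp only [sweepR, if_pos h]
      rcases this with h1 | h1 <;> right <;>
        simp only [List.length_cons] <;> push_cast <;> omega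
    · have := ih x r0 (i + 1)
      simp only [sweepR, if_neg h]
      rcases this with h1 | h1
      · left; exact h1
      · right; simp only [List.length_cons]; push_cast; omega

theorem sweepR_good : ∀ (xs : List Int) (mv r0 i : Int), r0 < i →
    ∀ (k : Nat) (hk : k < xs.length), (sweepR (mv, r0) i xs).2 < i + k →
      mv ≤ xs[k] ∧ ∀ (j : Nat), (hj : j < k) → xs[j] ≤ xs[k] := by
  intro xs
  induction xs with
  | nil => intro mv r0 i _ k hk; simp at hk
  | cons x xs ih =>
    intro mv r0 i h0 k hk hR
    by_cases h : x < mv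
    · simp only [sweepR, if_pos h] at hR ⊢
      match k with
      | 0 =>
        exfalso
        rcases sweepR_bounds xs mv i (i + 1) with hb | hb <;> omega
      | (k + 1) =>
        have hk' : k < xs.length := by simpa using hk
        have := ih mv i (i + 1) (by omega) k hk' (by push_cast at hR ⊢; omega)
        refine ⟨this.1, ?_⟩
        intro j hj
        match j with
        | 0 => have := this.1; simp only [List.getElem_cons_zero, List.getElem_cons_succ]; omega
        | (j + 1) =>
          simp only [List.getElem_cons_succ]
          exact this.2 j (by omega)
    · simp only [sweepR, if_neg h] at hR ⊢
      rw [not_lt] at h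
      match k with
      | 0 => exact ⟨h, by omega⟩
      | (k + 1) =>
        have hk' : k < xs.length := by simpa using hk
        have := ih x r0 (i + 1) (by omega) k hk' (by push_cast at hR ⊢; omega)
        refine ⟨by simp only [List.getElem_cons_succ]; omega, ?_⟩
        intro j hj
        match j with
        | 0 => simpa using this.1
        | (j + 1) =>
          simp only [List.getElem_cons_succ]
          exact this.2 j (by omega)

theorem sweepR_flag : ∀ (xs : List Int) (mv r0 i : Int), r0 < i →
    i ≤ (sweepR (mv, r0) i xs).2 →
    ∃ (k : Nat) (hk : k < xs.length), (sweepR (mv, r0) i xs).2 = i + k ∧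
      (xs[k] < mv ∨ ∃ (j : Nat) (hj : j < k), xs[k] < xs[j]) := by
  intro xs
  induction xs with
  | nil => intro mv r0 i h0 hR; simp only [sweepR] at hR; omega
  | cons x xs ih =>
    intro mv r0 i h0 hR
    by_cases h : x < mv
    · simp only [sweepR, if_pos h] at hR ⊢
      by_cases he : (sweepR (mv, i) (i + 1) xs).2 = i
      · exact ⟨0, by simp, by omega, Or.inl (by simpa using h)⟩
      · have hge : i + 1 ≤ (sweepR (mv, i) (i + 1) xs).2 := by
          rcases sweepR_bounds xs mv i (i + 1) with hb | hb <;> omega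
        obtain ⟨k, hk, hEq, hw⟩ := ih mv i (i + 1) (by omega) hge
        refine ⟨k + 1, by simpa using Nat.succ_lt_succ hk, by omega, ?_⟩
        rcases hw with hw | ⟨j, hj, hw⟩
        · exact Or.inl (by simpa using hw)
        · exact Or.inr ⟨j + 1, by omega, by simpa using hw⟩
    · simp only [sweepR, if_neg h] at hR ⊢
      rw [not_lt] at h
      have hge : i + 1 ≤ (sweepR (x, r0) (i + 1) xs).2 := by
        rcases sweepR_bounds xs x r0 (i + 1) with hb | hb <;> omega
      obtain ⟨k, hk, hEq, hw⟩ := ih x r0 (i + 1) (by omega) hge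
      refine ⟨k + 1, by simpa using Nat.succ_lt_succ hk, by omega, ?_⟩
      rcases hw with hw | ⟨j, hj, hw⟩
      · exact Or.inr ⟨0, by omega, by simp only [List.getElem_cons_succ, List.getElem_cons_zero]; omega⟩
      · exact Or.inr ⟨j + 1, by omega, by simpa using hw⟩

theorem sweepR_sorted : ∀ (xs : List Int) (mv r0 i : Int),
    (∀ x ∈ xs, mv ≤ x) → xs.Pairwise (· ≤ ·) → (sweepR (mv, r0) i xs).2 = r0 := by
  intro xs
  induction xs with
  | nil => intro mv r0 i _ _; rfl
  | cons x xs ih =>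
    intro mv r0 i hb hp
    have hx : mv ≤ x := hb x (by simp)
    rw [List.pairwise_cons] at hp
    simp only [sweepR, if_neg (by omega : ¬ x < mv)]
    exact ih x r0 (i + 1) (fun y hy => hp.1 y hy) hp.2

theorem sweepL_bounds : ∀ (xs : List Int) (mv l0 i : Int),
    (sweepL (mv, l0) i xs).2 = l0 ∨
      (i - xs.length < (sweepL (mv, l0) i xs).2 ∧ (sweepL (mv, l0) i xs).2 ≤ i) := by
  intro xs
  induction xs with
  | nil => intro mv l0 i; left; rfl
  | cons x xs ih =>
    intro mv l0 i
    by_cases h : x > mv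
    · have := ih mv i (i - 1)
      simp only [sweepL, if_pos h]
      rcases this with h1 | h1 <;> right <;>
        simp only [List.length_cons] <;> push_cast <;> omega
    · have := ih x l0 (i - 1)
      simp only [sweepL, if_neg h]
      rcases this with h1 | h1
      · left; exact h1
      · right; simp only [List.length_cons]; push_cast; omega

theorem sweepL_good : ∀ (xs : List Int) (mv l0 i : Int),
    (xs.length : Int) ≤ i + 1 → (l0 = -1 ∨ i < l0) →
    ∀ (k : Nat) (hk : k < xs.length),
      ((sweepL (mv, l0) i xs).2 = -1 ∨ i - k < (sweepL (mv, l0) i xs).2) →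
      xs[k] ≤ mv ∧ ∀ (j : Nat), (hj : j < k) → xs[k] ≤ xs[j] := by
  intro xs
  induction xs with
  | nil => intro mv l0 i _ _ k hk; simp at hk
  | cons x xs ih =>
    intro mv l0 i hlen h0 k hk hL
    have hi : (0:Int) ≤ i := by simp only [List.length_cons] at hlen; push_cast at hlen; omega
    have hlen' : (xs.length : Int) ≤ (i - 1) + 1 := by
      simp only [List.length_cons] at hlen; push_cast at hlen ⊢; omega
    by_cases h : x > mv
    · simp only [sweepL, if_pos h] at hL ⊢
      have hLne : (sweepL (mv, i) (i - 1) xs).2 ≠ -1 ∧ (sweepL (mv, i) (i - 1) xs).2 ≤ i := by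
        rcases sweepL_bounds xs mv i (i - 1) with hb | hb
        · constructor
          · omega
          · omega
        · push_cast at hlen' ⊢
          constructor <;> omega
      match k with
      | 0 =>
        exfalso
        rcases hL with hL | hL
        · exact hLne.1 hL
        · omega
      | (k + 1) =>
        have hk' : k < xs.length := by simpa using hk
        have hcond : (sweepL (mv, i) (i - 1) xs).2 = -1 ∨
            (i - 1) - (k : Int) < (sweepL (mv, i) (i - 1) xs).2 := by
          rcases hL with hL | hL
          · exact absurd hL hLne.1
          · right; omega
        have := ih mv i (i - 1) hlen' (by omega) k hk' hcond
        refine ⟨by simp only [List.getElem_cons_succ]; have := this.1; omega, ?_⟩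
        intro j hj
        match j with
        | 0 => simp only [List.getElem_cons_zero, List.getElem_cons_succ]; have := this.1; omega
        | (j + 1) =>
          simp only [List.getElem_cons_succ]
          exact this.2 j (by omega)
    · simp only [sweepL, if_neg h] at hL ⊢
      rw [not_lt] at h
      match k with
      | 0 => exact ⟨by simpa using h, by omega⟩
      | (k + 1) =>
        have hk' : k < xs.length := by simpa using hk
        have h0' : l0 = -1 ∨ i - 1 < l0 := by
          rcases h0 with h0 | h0
          · left; exact h0
          · right; omega
        have hcond : (sweepL (x, l0) (i - 1) xs).2 = -1 ∨
            (i - 1) - (k : Int) < (sweepL (x, l0) (i - 1) xs).2 := by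
          rcases hL with hL | hL
          · left; exact hL
          · right; omega
        have := ih x l0 (i - 1) hlen' h0' k hk' hcond
        refine ⟨by simp only [List.getElem_cons_succ]; have := this.1; omega, ?_⟩
        intro j hj
        match j with
        | 0 => simpa using this.1
        | (j + 1) =>
          simp only [List.getElem_cons_succ]
          exact this.2 j (by omega)

theorem sweepL_flag : ∀ (xs : List Int) (mv l0 i : Int),
    (xs.length : Int) ≤ i + 1 → (l0 = -1 ∨ i < l0) → (sweepL (mv, l0) i xs).2 ≠ l0 →
    ∃ (k : Nat) (hk : k < xs.length), (sweepL (mv, l0) i xs).2 = i - k ∧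
      (mv < xs[k] ∨ ∃ (j : Nat) (hj : j < k), xs[j] < xs[k]) := by
  intro xs
  induction xs with
  | nil => intro mv l0 i _ _ hne; simp only [sweepL] at hne; omega
  | cons x xs ih =>
    intro mv l0 i hlen h0 hne
    have hlen' : (xs.length : Int) ≤ (i - 1) + 1 := by
      simp only [List.length_cons] at hlen; push_cast at hlen ⊢; omega
    by_cases h : x > mv
    · simp only [sweepL, if_pos h] at hne ⊢
      by_cases he : (sweepL (mv, i) (i - 1) xs).2 = i
      · exact ⟨0, by simp, by omega, Or.inl (by simpa using h)⟩
      · obtain ⟨k, hk, hEq, hw⟩ := ih mv i (i - 1) hlen' (by omega) he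
        refine ⟨k + 1, by simpa using Nat.succ_lt_succ hk, ?_, ?_⟩
        · omega
        rcases hw with hw | ⟨j, hj, hw⟩
        · exact Or.inl (by simpa using hw)
        · exact Or.inr ⟨j + 1, by omega, by simpa using hw⟩
    · simp only [sweepL, if_neg h] at hne ⊢
      rw [not_lt] at h
      have h0' : l0 = -1 ∨ i - 1 < l0 := by
        rcases h0 with h0 | h0
        · left; exact h0
        · right; omega
      obtain ⟨k, hk, hEq, hw⟩ := ih x l0 (i - 1) hlen' h0' hne
      refine ⟨k + 1, by simpa using Nat.succ_lt_succ hk, ?_, ?_⟩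
      · omega
      rcases hw with hw | ⟨j, hj, hw⟩
      · exact Or.inr ⟨0, by omega, by simp only [List.getElem_cons_succ, List.getElem_cons_zero]; omega⟩
      · exact Or.inr ⟨j + 1, by omega, by simpa using hw⟩

theorem sweepL_sorted : ∀ (xs : List Int) (mv l0 i : Int),
    (∀ x ∈ xs, x ≤ mv) → xs.Pairwise (· ≥ ·) → (sweepL (mv, l0) i xs).2 = l0 := by
  intro xs
  induction xs with
  | nil => intro mv l0 i _ _; rfl
  | cons x xs ih =>
    intro mv l0 i hb hp
    have hx : x ≤ mv := hb x (by simp)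
    rw [List.pairwise_cons] at hp
    simp only [sweepL, if_neg (by omega : ¬ x > mv)]
    exact ih x l0 (i - 1) (fun y hy => hp.1 y hy) hp.2


-- The two loop results of A, as closed values of the sweeps.
def Rval (a : List Int) : Int := (sweepR (-10000000, -1) 0 a).2
def Lval (a : List Int) : Int := (sweepL (10000000, -1) ((a.length : Int) - 1) a.reverse).2

theorem subSort_eq (a : List Int) : subSort a = [Lval a, Rval a] := by
  unfold subSort Rval Lval
  dsimp only
  rw [bridge1 a a 0 (-10000000, -1) le_rfl (by simp),
      bridge2 a a.reverse ((a.length : Int) - 1) (10000000, -1) (by simp)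
        (by congr 1; rw [List.take_of_length_le]; omega)]

theorem good_right (a : List Int) (i : Nat) (hi : i < a.length) (hR : Rval a < (i : Int)) :
    ∀ (j : Nat), (hj : j < i) → a[j]'(by omega) ≤ a[i]'hi := by
  intro j hj
  unfold Rval at hR
  exact (sweepR_good a (-10000000) (-1) 0 (by omega) i hi (by omega)).2 j hj

theorem good_left (a : List Int) (p : Nat) (hp : p < a.length)
    (hL : Lval a = -1 ∨ (p : Int) < Lval a) :
    ∀ (q : Nat), p < q → (hq : q < a.length) → a[p]'hp ≤ a[q]'hq := by
  intro q hpq hq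
  unfold Lval at hL
  have hk : a.length - 1 - p < a.reverse.length := by simp; omega
  have hres := sweepL_good a.reverse 10000000 (-1) ((a.length : Int) - 1)
    (by simp) (Or.inl rfl) (a.length - 1 - p) hk
    (by
      rcases hL with hL | hL
      · left; exact hL
      · right; omega)
  have hj : a.length - 1 - q < a.length - 1 - p := by omega
  have h2 := hres.2 (a.length - 1 - q) hj
  rw [List.getElem_reverse, List.getElem_reverse] at h2
  have e1 : a.length - 1 - (a.length - 1 - p) = p := by omega
  have e2 : a.length - 1 - (a.length - 1 - q) = q := by omega
  simp only [e1, e2] at h2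
  exact h2

theorem flag_right (a : List Int) (hpre : Pre_subSort a) (h0 : 0 ≤ Rval a) :
    ∃ (k : Nat) (hk : k < a.length), Rval a = (k : Int) ∧
      ∃ (j : Nat) (hj : j < k), a[k] < a[j]'(by omega) := by
  unfold Rval at h0 ⊢
  obtain ⟨k, hk, hEq, hw⟩ := sweepR_flag a (-10000000) (-1) 0 (by omega) (by omega)
  refine ⟨k, hk, by omega, ?_⟩
  rcases hw with hw | hw
  · exfalso
    have := (hpre a[k] (List.getElem_mem hk)).1
    omega
  · exact hw

theorem flag_left (a : List Int) (hpre : Pre_subSort a) (h0 : Lval a ≠ -1) :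
    ∃ (p : Nat) (hp : p < a.length), Lval a = (p : Int) ∧
      ∃ (q : Nat) (hq : q < a.length), p < q ∧ a[q] < a[p]'hp := by
  unfold Lval at h0 ⊢
  obtain ⟨k, hk, hEq, hw⟩ := sweepL_flag a.reverse 10000000 (-1) ((a.length : Int) - 1)
    (by simp) (Or.inl rfl) h0
  rw [List.length_reverse] at hk
  have hp : a.length - 1 - k < a.length := by omega
  refine ⟨a.length - 1 - k, hp, by omega, ?_⟩
  rcases hw with hw | ⟨j, hj, hw⟩
  · exfalso
    rw [List.getElem_reverse] at hw
    have := (hpre _ (List.getElem_mem (by omega : a.length - 1 - k < a.length))).2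
    omega
  · have hq : a.length - 1 - j < a.length := by omega
    refine ⟨a.length - 1 - j, hq, by omega, ?_⟩
    rw [List.getElem_reverse, List.getElem_reverse] at hw
    exact hw

theorem pairwise_of_R_neg (a : List Int) (h : Rval a = -1) : a.Pairwise (· ≤ ·) := by
  rw [List.pairwise_iff_getElem]
  intro i j hi hj hij
  exact good_right a j hj (by omega) i hij

theorem pairwise_of_L_neg (a : List Int) (h : Lval a = -1) : a.Pairwise (· ≤ ·) := by
  rw [List.pairwise_iff_getElem]
  intro i j hi hj hij
  exact good_left a i hi (Or.inl h) j hij hj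

theorem R_neg_of_pairwise (a : List Int) (hpre : Pre_subSort a)
    (h : a.Pairwise (· ≤ ·)) : Rval a = -1 :=
  sweepR_sorted a (-10000000) (-1) 0 (fun x hx => (hpre x hx).1) h

theorem L_neg_of_pairwise (a : List Int) (hpre : Pre_subSort a)
    (h : a.Pairwise (· ≤ ·)) : Lval a = -1 := by
  refine sweepL_sorted a.reverse 10000000 (-1) ((a.length : Int) - 1)
    (fun x hx => (hpre x (by simpa using hx)).2) ?_
  rw [List.pairwise_reverse]
  exact h

theorem sorted_split_right (a : List Int) (k : Nat) (hk : k < a.length)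
    (hgood : ∀ (i : Nat), (hi : i < a.length) → k < i →
      ∀ (j : Nat), (hj : j < i) → a[j]'(by omega) ≤ a[i]'hi) :
    PySem.List.sorted a (fun x => x) false
      = PySem.List.sorted (a.take (k + 1)) (fun x => x) false ++ a.drop (k + 1) := by
  apply PySem.List.sorted_id_eq_of_perm_of_pairwise
  · have h1 := PySem.List.sorted_perm (a.take (k + 1)) (fun x => x) false
    have h2 := h1.append_right (a.drop (k + 1))
    rwa [List.take_append_drop] at h2
  · rw [List.pairwise_append]
    refine ⟨PySem.List.sorted_pairwise (a.take (k + 1)) (fun x => x), ?_, ?_⟩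
    · rw [List.pairwise_iff_getElem]
      intro i j hi hj hij
      rw [List.length_drop] at hi hj
      rw [List.getElem_drop, List.getElem_drop]
      exact hgood (k + 1 + j) (by omega) (by omega) (k + 1 + i) (by omega)
    · intro x hx y hy
      have hx' : x ∈ a.take (k + 1) := (PySem.List.mem_sorted _ _ _ _).mp hx
      obtain ⟨j0, hj0, hxe⟩ := List.mem_iff_getElem.mp hx'
      obtain ⟨i0, hi0, hye⟩ := List.mem_iff_getElem.mp (List.mem_iff_getElem.mpr
        (List.mem_iff_getElem.mp hy))
      rw [List.length_take] at hj0
      rw [List.length_drop] at hi0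
      rw [List.getElem_take] at hxe
      rw [List.getElem_drop] at hye
      rw [← hxe, ← hye]
      exact hgood (k + 1 + i0) (by omega) (by omega) j0 (by omega)

theorem sorted_split_left (a : List Int) (p : Nat) (hp : p < a.length)
    (hgood : ∀ (j : Nat), (hj : j < a.length) → j < p →
      ∀ (q : Nat), j < q → (hq : q < a.length) → a[j]'hj ≤ a[q]'hq) :
    PySem.List.sorted a (fun x => x) false
      = a.take p ++ PySem.List.sorted (a.drop p) (fun x => x) false := by
  apply PySem.List.sorted_id_eq_of_perm_of_pairwise
  · have h1 := PySem.List.sorted_perm (a.drop p) (fun x => x) false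
    have h2 := h1.append_left (a.take p)
    rwa [List.take_append_drop] at h2
  · rw [List.pairwise_append]
    refine ⟨?_, PySem.List.sorted_pairwise (a.drop p) (fun x => x), ?_⟩
    · rw [List.pairwise_iff_getElem]
      intro i j hi hj hij
      rw [List.length_take] at hi hj
      rw [List.getElem_take, List.getElem_take]
      exact hgood i (by omega) (by omega) j hij (by omega)
    · intro x hx y hy
      have hy' : y ∈ a.drop p := (PySem.List.mem_sorted _ _ _ _).mp hy
      obtain ⟨j0, hj0, hxe⟩ := List.mem_iff_getElem.mp hx
      obtain ⟨i0, hi0, hye⟩ := List.mem_iff_getElem.mp hy'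
      rw [List.length_take] at hj0
      rw [List.length_drop] at hi0
      rw [List.getElem_take] at hxe
      rw [List.getElem_drop] at hye
      rw [← hxe, ← hye]
      exact hgood j0 (by omega) (by omega) (p + i0) (by omega) (by omega)

theorem getLastD_mem (l : List Int) (hne : l ≠ []) (d : Int) : l.getLastD d ∈ l := by
  induction l generalizing d with
  | nil => simp at hne
  | cons h t ih =>
    rw [List.getLastD_cons]
    cases t with
    | nil => simp
    | cons b t' => exact List.mem_cons_of_mem h (ih (by simp) h)

theorem getLast_of_max (l : List Int) (hp : l.Pairwise (· < ·))
    (x : Int) (hx : x ∈ l) (hub : ∀ y ∈ l, y ≤ x) (d : Int) : l.getLastD d = x := by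
  induction l generalizing d with
  | nil => simp at hx
  | cons h t ih =>
    rw [List.pairwise_cons] at hp
    rw [List.getLastD_cons]
    cases t with
    | nil => simp at hx; simp [hx]
    | cons b t' =>
      rcases List.mem_cons.mp hx with hx | hx
      · exfalso
        have hm : (b :: t').getLastD h ∈ (b :: t') := getLastD_mem _ (by simp) h
        have h1 := hp.1 _ hm
        have h2 := hub _ (List.mem_cons_of_mem h hm)
        omega
      · exact ih hp.2 hx (fun y hy => hub y (List.mem_cons_of_mem h hy)) h

theorem head_of_min (l : List Int) (hp : l.Pairwise (· < ·))
    (x : Int) (hx : x ∈ l) (hlb : ∀ y ∈ l, x ≤ y) (d : Int) : l.headD d = x := by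
  match l, hx with
  | (h :: t), hx =>
    simp only [List.headD_cons]
    rw [List.pairwise_cons] at hp
    rcases List.mem_cons.mp hx with hx | hx
    · omega
    · have h1 := hp.1 x hx
      have h2 := hlb h (by simp)
      omega


-- The mismatch-index list B builds, and its characterisation.
def diffList (a : List Int) : List Int :=
  (PySem.List.pyRange 0 (a.length : Int) 1).filter
    (fun i => decide (PySem.List.pyGetD a i 0 ≠
      PySem.List.pyGetD (PySem.List.sorted a (fun x => x) false) i 0))

theorem alt_eq (a : List Int) :
    subSort_alt a = if diffList a = [] then [-1, -1]
      else [(diffList a).headD 0, (diffList a).getLastD 0] := by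
  unfold subSort_alt diffList
  dsimp only
  by_cases h : (PySem.List.pyRange 0 (a.length : Int) 1).filter
      (fun i => decide (PySem.List.pyGetD a i 0 ≠
        PySem.List.pyGetD (PySem.List.sorted a (fun x => x) false) i 0)) = []
  · rw [if_pos h, if_pos h]
  · rw [if_neg h, if_neg h]
    obtain ⟨c, t, he⟩ := List.exists_cons_of_ne_nil h
    rw [he]
    rw [PySem.List.pyGetD_zero_cons, PySem.List.pyGetD_neg_one (c :: t) 0 (by simp)]
    rw [List.getLast_eq_getLastD, List.headD_cons, List.getLastD_cons]

theorem mem_diffList (a : List Int) (x : Int) :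
    x ∈ diffList a ↔ 0 ≤ x ∧ x < (a.length : Int) ∧
      PySem.List.pyGetD a x 0 ≠
        PySem.List.pyGetD (PySem.List.sorted a (fun x => x) false) x 0 := by
  unfold diffList
  rw [List.mem_filter, PySem.List.mem_pyRange_one]
  simp [and_assoc]

theorem mem_diffList_nat (a : List Int) (i : Nat) (hi : i < a.length) :
    (i : Int) ∈ diffList a ↔
      a[i] ≠ (PySem.List.sorted a (fun x => x) false)[i]'(by
        rw [PySem.List.length_sorted]; omega) := by
  rw [mem_diffList]
  rw [PySem.List.pyGetD_eq_getElem a 0 (by positivity) (by omega)]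
  rw [PySem.List.pyGetD_eq_getElem _ 0 (by positivity)
    (by rw [PySem.List.length_sorted]; omega)]
  simp only [Int.toNat_natCast]
  constructor
  · exact fun h => h.2.2
  · exact fun h => ⟨by positivity, by omega, h⟩

theorem diffList_pairwise (a : List Int) : (diffList a).Pairwise (· < ·) :=
  (PySem.List.pairwise_lt_pyRange_one 0 (a.length : Int)).filter _

theorem getElem_idx_congr (l : List Int) (i j : Nat) (h : i = j) (hi : i < l.length) :
    l[i]'hi = l[j]'(h ▸ hi) := by subst h; rfl

theorem agree_right (a : List Int) (k : Nat) (hk : k < a.length)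
    (hgood : ∀ (i : Nat), (hi : i < a.length) → k < i →
      ∀ (j : Nat), (hj : j < i) → a[j]'(by omega) ≤ a[i]'hi)
    (i : Nat) (hi : i < a.length) (hki : k < i) :
    (PySem.List.sorted a (fun x => x) false)[i]'(by rw [PySem.List.length_sorted]; omega)
      = a[i] := by
  have hlen_take : (PySem.List.sorted (a.take (k + 1)) (fun x => x) false).length = k + 1 := by
    rw [PySem.List.length_sorted, List.length_take]; omega
  rw [List.getElem_of_eq (sorted_split_right a k hk hgood)]
  rw [List.getElem_append_right (by rw [hlen_take]; omega)]
  rw [List.getElem_drop]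
  apply getElem_idx_congr
  rw [hlen_take]
  omega

theorem agree_left (a : List Int) (p : Nat) (hp : p < a.length)
    (hgood : ∀ (j : Nat), (hj : j < a.length) → j < p →
      ∀ (q : Nat), j < q → (hq : q < a.length) → a[j]'hj ≤ a[q]'hq)
    (i : Nat) (hi : i < a.length) (hip : i < p) :
    (PySem.List.sorted a (fun x => x) false)[i]'(by rw [PySem.List.length_sorted]; omega)
      = a[i] := by
  rw [List.getElem_of_eq (sorted_split_left a p hp hgood)]
  rw [List.getElem_append_left (by rw [List.length_take]; omega)]
  exact List.getElem_take

theorem mismatch_right (a : List Int) (k : Nat) (hk : k < a.length)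
    (hgood : ∀ (i : Nat), (hi : i < a.length) → k < i →
      ∀ (j : Nat), (hj : j < i) → a[j]'(by omega) ≤ a[i]'hi)
    (j : Nat) (hj : j < k) (hw : a[k] < a[j]'(by omega)) :
    a[k] < (PySem.List.sorted a (fun x => x) false)[k]'(by
      rw [PySem.List.length_sorted]; omega) := by
  have hlen_take : (PySem.List.sorted (a.take (k + 1)) (fun x => x) false).length = k + 1 := by
    rw [PySem.List.length_sorted, List.length_take]; omega
  rw [List.getElem_of_eq (sorted_split_right a k hk hgood)]
  rw [List.getElem_append_left (by rw [hlen_take]; omega)]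
  have hmem : a[j]'(by omega) ∈ PySem.List.sorted (a.take (k + 1)) (fun x => x) false := by
    rw [PySem.List.mem_sorted]
    have : a[j]'(by omega) = (a.take (k + 1))[j]'(by rw [List.length_take]; omega) := by
      rw [List.getElem_take]
    rw [this]
    exact List.getElem_mem _
  obtain ⟨pp, hpp, he⟩ := List.mem_iff_getElem.mp hmem
  have hmono := PySem.List.sorted_id_getElem_mono (a.take (k + 1))
    (by omega : pp ≤ k) (by rw [hlen_take]; omega)
  omega

theorem mismatch_left (a : List Int) (p : Nat) (hp : p < a.length)
    (hgood : ∀ (j : Nat), (hj : j < a.length) → j < p →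
      ∀ (q : Nat), j < q → (hq : q < a.length) → a[j]'hj ≤ a[q]'hq)
    (q : Nat) (hq : q < a.length) (hpq : p < q) (hw : a[q] < a[p]) :
    (PySem.List.sorted a (fun x => x) false)[p]'(by
      rw [PySem.List.length_sorted]; omega) < a[p] := by
  have hlen_take : (a.take p).length = p := by rw [List.length_take]; omega
  have hlen_drop : (PySem.List.sorted (a.drop p) (fun x => x) false).length = a.length - p := by
    simp [PySem.List.length_sorted]
  rw [List.getElem_of_eq (sorted_split_left a p hp hgood)]
  rw [List.getElem_append_right (by rw [hlen_take])]
  have hmem : a[q] ∈ PySem.List.sorted (a.drop p) (fun x => x) false := by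
    rw [PySem.List.mem_sorted]
    have : a[q] = (a.drop p)[q - p]'(by rw [List.length_drop]; omega) := by
      rw [List.getElem_drop]
      exact getElem_idx_congr a q (p + (q - p)) (by omega) hq
    rw [this]
    exact List.getElem_mem _
  obtain ⟨pp, hpp, he⟩ := List.mem_iff_getElem.mp hmem
  have hmono := PySem.List.sorted_id_getElem_mono (a.drop p)
    (by omega : 0 ≤ pp) hpp
  have hz : p - (a.take p).length = 0 := by rw [hlen_take]; omega
  rw [getElem_idx_congr _ _ 0 hz]
  have h0 := PySem.List.sorted_id_getElem_mono (a.drop p)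
    (by omega : 0 ≤ pp) hpp
  omega

-- ===== VERDICT (by name: the statement is the Claim_ definition above) =====
theorem subSort_spec : Claim_equal_subSort := by
  intro a _hdom hpre
  unfold Spec_subSort
  rw [subSort_eq, alt_eq]
  have hslen : (PySem.List.sorted a (fun x => x) false).length = a.length :=
    PySem.List.length_sorted a (fun x => x) false
  by_cases hd : diffList a = []
  · rw [if_pos hd]
    have haseq : a = PySem.List.sorted a (fun x => x) false := by
      apply List.ext_getElem (by omega)
      intro i h1 h2
      by_contra hne
      have : ((i : Nat) : Int) ∈ diffList a := (mem_diffList_nat a i h1).mpr hne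
      rw [hd] at this
      simp at this
    have hps : a.Pairwise (· ≤ ·) := by
      have := PySem.List.sorted_pairwise a (fun x => x)
      rw [← haseq] at this
      simpa using this
    rw [R_neg_of_pairwise a hpre hps, L_neg_of_pairwise a hpre hps]
  · rw [if_neg hd]
    have hnps : ¬ a.Pairwise (· ≤ ·) := by
      intro hps
      apply hd
      have heq : PySem.List.sorted a (fun x => x) false = a :=
        PySem.List.sorted_eq_self_of_pairwise a (fun x => x) (by simpa using hps)
      rw [List.eq_nil_iff_forall_not_mem]
      intro x hx
      obtain ⟨h1, h2, h3⟩ := (mem_diffList a x).mp hx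
      exact h3 (by rw [heq])
    have hR0 : 0 ≤ Rval a := by
      have hb := sweepR_bounds a (-10000000) (-1) 0
      unfold Rval
      rcases hb with hb | hb
      · exact absurd (pairwise_of_R_neg a hb) hnps
      · omega
    have hL0 : Lval a ≠ -1 := fun h => hnps (pairwise_of_L_neg a h)
    obtain ⟨k, hk, hRk, j, hj, hjw⟩ := flag_right a hpre hR0
    obtain ⟨p, hp, hLp, q, hq, hpq, hqw⟩ := flag_left a hpre hL0
    have hgoodR : ∀ (i : Nat), (hi : i < a.length) → k < i →
        ∀ (j' : Nat), (hj' : j' < i) → a[j']'(by omega) ≤ a[i]'hi := by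
      intro i hi hki j' hj'
      exact good_right a i hi (by omega) j' hj'
    have hgoodL : ∀ (j' : Nat), (hj' : j' < a.length) → j' < p →
        ∀ (q' : Nat), j' < q' → (hq' : q' < a.length) → a[j']'hj' ≤ a[q']'hq' := by
      intro j' hj' hjp q' hq1 hq2
      exact good_left a j' hj' (Or.inr (by omega)) q' hq1 hq2
    have hRmem : ((k : Nat) : Int) ∈ diffList a :=
      (mem_diffList_nat a k hk).mpr (by
        have := mismatch_right a k hk hgoodR j hj hjw
        omega)
    have hLmem : ((p : Nat) : Int) ∈ diffList a :=
      (mem_diffList_nat a p hp).mpr (by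
        have := mismatch_left a p hp hgoodL q hq hpq hqw
        omega)
    have hub : ∀ x ∈ diffList a, x ≤ (k : Int) := by
      intro x hx
      obtain ⟨h1, h2, h3⟩ := (mem_diffList a x).mp hx
      by_contra hgt
      rw [not_le] at hgt
      apply h3
      rw [PySem.List.pyGetD_eq_getElem a 0 h1 h2,
          PySem.List.pyGetD_eq_getElem _ 0 h1 (by omega)]
      exact (agree_right a k hk hgoodR x.toNat (by omega) (by omega)).symm
    have hlb : ∀ x ∈ diffList a, (p : Int) ≤ x := by
      intro x hx
      obtain ⟨h1, h2, h3⟩ := (mem_diffList a x).mp hx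
      by_contra hlt
      rw [not_le] at hlt
      apply h3
      rw [PySem.List.pyGetD_eq_getElem a 0 h1 h2,
          PySem.List.pyGetD_eq_getElem _ 0 h1 (by omega)]
      exact (agree_left a p hp hgoodL x.toNat (by omega) (by omega)).symm
    rw [getLast_of_max (diffList a) (diffList_pairwise a) (k : Int) hRmem hub 0,
        head_of_min (diffList a) (diffList_pairwise a) (p : Int) hLmem hlb 0,
        hRk, hLp]
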